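-- pv_equiv track=rewrite | github.com/Vincent3103/Vincent-Frandy_Technical-Assessment_240829 | skill_level.py | max_skill_level
-- ===== SOURCE A (Python) =====
-- def validate_input(N, M, A, B):
--     # Validasi N dan M
--     if not (1 <= N <= 100 and 1 <= M <= 100):
--         raise ValueError("N dan M harus antara 1 dan 100")
--
--     # Validasi A dan B
--     for a in A:
--         if not (1 <= a <= 1000):
--             raise ValueError("Tingkat kemahiran (A) harus antara 1 dan 1000")
--
--     for b in B:
--         if not (1 <= b <= 1000):
--             raise ValueError("Increment (B) harus antara 1 dan 1000")
--
-- def max_skill_level(N, M, A, B):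
--     # Validasi Input
--     validate_input(N, M, A, B)
--
--     # Buat pasangan (tingkat kemahiran, increment)
--     opponents = list(zip(A, B))
--
--     # Urutkan lawan berdasarkan tingkat kemahiran
--     opponents.sort()
--
--     current_skill = M
--
--     for skill, increment in opponents:
--         if skill <= current_skill:
--             current_skill += increment
--
--     return current_skill
-- ===== SOURCE B (Python) =====
-- def validate_input(N, M, A, B):
--     # Validasi N dan M
--     if not (1 <= N <= 100 and 1 <= M <= 100):
--         raise ValueError("N dan M harus antara 1 dan 100")
--
--     # Validasi A dan B
--     for a in A:
--         if not (1 <= a <= 1000):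
--             raise ValueError("Tingkat kemahiran (A) harus antara 1 dan 1000")
--
--     for b in B:
--         if not (1 <= b <= 1000):
--             raise ValueError("Increment (B) harus antara 1 dan 1000")
--
-- def max_skill_level(N, M, A, B):
--     validate_input(N, M, A, B)
--     opponents = list(zip(A, B))
--     beaten = [False] * len(opponents)
--     current_skill = M
--     changed = True
--     while changed:
--         changed = False
--         for i, (skill, increment) in enumerate(opponents):
--             if not beaten[i] and skill <= current_skill:
--                 beaten[i] = True
--                 current_skill += increment
--                 changed = True
--     return current_skill
-- ===== Notes on version B (the rewrite author's own statement) =====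
-- stated objective: alternative
-- what changed: Replaces sort-then-single-greedy-pass with an unsorted fixpoint iteration: repeated scans over the opponent list with a beaten-flag array until a full pass beats no new opponent; both compute the least fixpoint of skill growth.
import Mathlib
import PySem

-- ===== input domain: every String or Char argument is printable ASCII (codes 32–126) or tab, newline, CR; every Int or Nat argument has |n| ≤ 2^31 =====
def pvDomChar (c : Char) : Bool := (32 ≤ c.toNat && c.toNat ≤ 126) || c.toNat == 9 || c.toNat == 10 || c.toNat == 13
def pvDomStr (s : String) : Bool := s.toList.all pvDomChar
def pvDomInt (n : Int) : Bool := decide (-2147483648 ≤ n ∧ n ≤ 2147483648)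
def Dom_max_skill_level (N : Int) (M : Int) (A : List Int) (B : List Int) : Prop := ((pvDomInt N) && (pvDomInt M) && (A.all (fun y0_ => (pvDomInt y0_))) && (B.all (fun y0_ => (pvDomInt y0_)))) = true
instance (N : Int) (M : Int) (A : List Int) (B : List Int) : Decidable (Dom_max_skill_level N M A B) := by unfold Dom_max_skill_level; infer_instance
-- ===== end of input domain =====

-- B replaces sort-then-one-greedy-pass by an unsorted fixpoint iteration (repeated scans with a
-- beaten-flag list until a full pass beats nobody new); equivalence of the RETURN value is proved.

-- ===== PORT A =====
-- validate_input raises ValueError outside Pre_max_skill_level; the port computes the non-raising path.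
def max_skill_level (N : Int) (M : Int) (A : List Int) (B : List Int) : Int :=
  let opponents := PySem.List.sorted2 (A.zip B) Prod.fst Prod.snd   -- opponents.sort(): tuple (lexicographic) order
  opponents.foldl (fun current_skill p => if p.1 ≤ current_skill then current_skill + p.2 else current_skill) M

-- ===== PORT B =====
-- one 'for i, (skill, increment) in enumerate(opponents)' pass of Source B: state is the flagged list and
-- current_skill; returns (current_skill, updated flags, changed)
def pvPass : Int → List ((Int × Int) × Bool) → Int × List ((Int × Int) × Bool) × Bool
  | c, [] => (c, [], false)
  | c, q :: t =>
    if !q.2 && decide (q.1.1 ≤ c) then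
      let r := pvPass (c + q.1.2) t
      (r.1, (q.1, true) :: r.2.1, true)
    else
      let r := pvPass c t
      (r.1, q :: r.2.1, r.2.2)

-- the 'while changed' loop of Source B; fuel = len(opponents)+1 passes provably suffice, since every
-- pass with changed=True beats at least one new opponent (pass_progress below)
def pvLoop : Nat → Int → List ((Int × Int) × Bool) → Int
  | 0, c, _ => c
  | fuel + 1, c, st =>
    let r := pvPass c st
    if r.2.2 then pvLoop fuel r.1 r.2.1 else r.1

def max_skill_level_alt (N : Int) (M : Int) (A : List Int) (B : List Int) : Int :=
  let opponents := A.zip B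
  pvLoop (opponents.length + 1) M (opponents.map (fun p => (p, false)))

-- ===== PRECONDITION & SPEC =====
-- Pre_ = exactly the inputs validate_input accepts (otherwise A raises ValueError)
def Pre_max_skill_level (N : Int) (M : Int) (A : List Int) (B : List Int) : Prop :=
  (1 ≤ N ∧ N ≤ 100) ∧ (1 ≤ M ∧ M ≤ 100) ∧ (∀ a ∈ A, 1 ≤ a ∧ a ≤ 1000) ∧ (∀ b ∈ B, 1 ≤ b ∧ b ≤ 1000)
instance (N : Int) (M : Int) (A : List Int) (B : List Int) : Decidable (Pre_max_skill_level N M A B) := by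
  unfold Pre_max_skill_level; infer_instance

def pvWitness_max_skill_level : Int × Int × List Int × List Int := (2, 3, [2, 5], [4, 7])

def Spec_max_skill_level (N : Int) (M : Int) (A : List Int) (B : List Int) (out : Int) : Prop := out = max_skill_level_alt N M A B
instance (N : Int) (M : Int) (A : List Int) (B : List Int) (out : Int) : Decidable (Spec_max_skill_level N M A B out) := by unfold Spec_max_skill_level; infer_instance

-- ===== CLAIM (what is proved, stated in full; the proofs are below) =====
def Claim_equal_max_skill_level : Prop := ∀ (N : Int) (M : Int) (A : List Int) (B : List Int), Dom_max_skill_level N M A B → Pre_max_skill_level N M A B → Spec_max_skill_level N M A B (max_skill_level N M A B)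

-- ===== LEMMAS AND PROOFS =====

-- total increment of the pairs of l whose skill is ≤ w
def sumLe (w : Int) (l : List (Int × Int)) : Int :=
  ((l.filter (fun p => decide (p.1 ≤ w))).map Prod.snd).sum
-- total increment of the beaten entries of a flagged state
def sumB (st : List ((Int × Int) × Bool)) : Int :=
  ((st.filter (fun q => q.2)).map (fun q => q.1.2)).sum
-- total increment of the UNbeaten entries with skill ≤ w
def sumLeU (w : Int) (st : List ((Int × Int) × Bool)) : Int :=
  ((st.filter (fun q => !q.2 && decide (q.1.1 ≤ w))).map (fun q => q.1.2)).sum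
-- number of unbeaten entries
def unbeat (st : List ((Int × Int) × Bool)) : Nat := (st.filter (fun q => !q.2)).length
-- A's greedy for-loop (definitionally the foldl of the port)
def gr (l : List (Int × Int)) (c : Int) : Int :=
  l.foldl (fun current_skill p => if p.1 ≤ current_skill then current_skill + p.2 else current_skill) c

theorem sumLe_cons (w : Int) (p : Int × Int) (t : List (Int × Int)) :
    sumLe w (p :: t) = (if p.1 ≤ w then p.2 else 0) + sumLe w t := by
  by_cases h : p.1 ≤ w <;> simp [sumLe, h]

theorem sumLe_nonneg (w : Int) (l : List (Int × Int)) (h : ∀ p ∈ l, 0 ≤ p.2) : 0 ≤ sumLe w l := by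
  induction l with
  | nil => simp [sumLe]
  | cons p t ih =>
      rw [sumLe_cons]
      have h1 := h p (by simp)
      have h2 := ih (fun q hq => h q (by simp [hq]))
      split_ifs <;> omega

theorem sumLe_zero (w : Int) (l : List (Int × Int)) (h : ∀ p ∈ l, ¬ p.1 ≤ w) : sumLe w l = 0 := by
  induction l with
  | nil => simp [sumLe]
  | cons p t ih =>
      rw [sumLe_cons, ih (fun q hq => h q (by simp [hq]))]
      simp [h p (by simp)]

theorem sumLe_perm (w : Int) {l l' : List (Int × Int)} (h : l.Perm l') : sumLe w l = sumLe w l' :=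
  List.Perm.sum_eq (List.Perm.map _ (List.Perm.filter _ h))

theorem sumLeU_cons (w : Int) (q : (Int × Int) × Bool) (t : List ((Int × Int) × Bool)) :
    sumLeU w (q :: t) = (if !q.2 && decide (q.1.1 ≤ w) then q.1.2 else 0) + sumLeU w t := by
  by_cases h : (!q.2 && decide (q.1.1 ≤ w)) = true <;> simp [sumLeU, h]

theorem sumLeU_nonneg (w : Int) (st : List ((Int × Int) × Bool)) (h : ∀ q ∈ st, 0 ≤ q.1.2) :
    0 ≤ sumLeU w st := by
  induction st with
  | nil => simp [sumLeU]
  | cons q t ih =>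
      rw [sumLeU_cons]
      have h1 := h q (by simp)
      have h2 := ih (fun r hr => h r (by simp [hr]))
      split_ifs <;> omega

theorem sumB_cons (q : (Int × Int) × Bool) (t : List ((Int × Int) × Bool)) :
    sumB (q :: t) = (if q.2 then q.1.2 else 0) + sumB t := by
  by_cases h : q.2 = true <;> simp [sumB, h]

theorem unbeat_cons (q : (Int × Int) × Bool) (t : List ((Int × Int) × Bool)) :
    unbeat (q :: t) = (if q.2 then 0 else 1) + unbeat t := by
  by_cases h : q.2 = true <;> simp [unbeat, h, Nat.add_comm]

-- ---- greedy (port A) lemmas ----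

theorem gr_cons (p : Int × Int) (t : List (Int × Int)) (c : Int) :
    gr (p :: t) c = if p.1 ≤ c then gr t (c + p.2) else gr t c := by
  by_cases h : p.1 ≤ c <;> simp [gr, List.foldl_cons, h]

theorem gr_ge (l : List (Int × Int)) (hp : ∀ p ∈ l, 0 ≤ p.2) : ∀ c, c ≤ gr l c := by
  induction l with
  | nil => intro c; simp [gr]
  | cons p t ih =>
      intro c
      have h1 := hp p (by simp)
      have iht := ih (fun q hq => hp q (by simp [hq]))
      rw [gr_cons]
      split_ifs
      · have := iht (c + p.2); omega
      · exact iht c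

theorem gr_skip (l : List (Int × Int)) (c : Int) (h : ∀ p ∈ l, ¬ p.1 ≤ c) : gr l c = c := by
  induction l with
  | nil => simp [gr]
  | cons p t ih =>
      rw [gr_cons]
      simp only [h p (by simp), if_false]
      exact ih (fun q hq => h q (by simp [hq]))

-- characterization of A's result on a skill-sorted list: the beaten set is exactly {skill ≤ result}
theorem gr_char : ∀ (l : List (Int × Int)), l.Pairwise (fun a b => a.1 ≤ b.1) →
    (∀ p ∈ l, 0 ≤ p.2) → ∀ c, gr l c = c + sumLe (gr l c) l := by
  intro l
  induction l with
  | nil => intro _ _ c; simp [gr, sumLe]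
  | cons p t ih =>
      intro hs hp c
      have hhead := List.pairwise_cons.mp hs
      have hpt : ∀ q ∈ t, 0 ≤ q.2 := fun q hq => hp q (by simp [hq])
      rw [gr_cons]
      by_cases h : p.1 ≤ c
      · simp only [h, if_true]
        have hv : c + p.2 ≤ gr t (c + p.2) := gr_ge t hpt (c + p.2)
        have hb := hp p (by simp)
        rw [sumLe_cons]
        have hple : p.1 ≤ gr t (c + p.2) := by omega
        simp only [hple, if_true]
        have := ih hhead.2 hpt (c + p.2)
        omega
      · simp only [h, if_false]
        have hskip : ∀ q ∈ t, ¬ q.1 ≤ c := fun q hq => by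
          have := hhead.1 q hq; omega
        rw [gr_skip t c hskip, sumLe_cons, sumLe_zero c t hskip]
        simp [h]

-- A's greedy never exceeds a value w closed under beating everything with skill ≤ w
theorem gr_le (w : Int) (l : List (Int × Int)) (hp : ∀ p ∈ l, 0 ≤ p.2) :
    ∀ c k, 0 ≤ k → c + k + sumLe w l ≤ w → gr l c ≤ w := by
  induction l with
  | nil => intro c k hk h; simp [gr, sumLe] at h ⊢; omega
  | cons p t ih =>
      intro c k hk h
      have hb := hp p (by simp)
      have hpt : ∀ q ∈ t, 0 ≤ q.2 := fun q hq => hp q (by simp [hq])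
      rw [sumLe_cons] at h
      have hsnn := sumLe_nonneg w t hpt
      rw [gr_cons]
      by_cases hc : p.1 ≤ c
      · simp only [hc, if_true]
        have hcw : c ≤ w := by split_ifs at h <;> omega
        have hpw : p.1 ≤ w := le_trans hc hcw
        simp only [hpw, if_true] at h
        exact ih hpt (c + p.2) k hk (by omega)
      · simp only [hc, if_false]
        refine ih hpt c (k + (if p.1 ≤ w then p.2 else 0)) ?_ (by omega)
        split_ifs <;> omega

-- ---- pass (port B) lemmas ----

theorem pvPass_cons_true (c : Int) (hd : (Int × Int) × Bool) (t : List ((Int × Int) × Bool))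
    (h : (!hd.2 && decide (hd.1.1 ≤ c)) = true) :
    (pvPass c (hd :: t)).1 = (pvPass (c + hd.1.2) t).1 ∧
    (pvPass c (hd :: t)).2.1 = (hd.1, true) :: (pvPass (c + hd.1.2) t).2.1 ∧
    (pvPass c (hd :: t)).2.2 = true := by
  refine ⟨?_, ?_, ?_⟩ <;> simp [pvPass, h]

theorem pvPass_cons_false (c : Int) (hd : (Int × Int) × Bool) (t : List ((Int × Int) × Bool))
    (h : (!hd.2 && decide (hd.1.1 ≤ c)) = false) :
    (pvPass c (hd :: t)).1 = (pvPass c t).1 ∧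
    (pvPass c (hd :: t)).2.1 = hd :: (pvPass c t).2.1 ∧
    (pvPass c (hd :: t)).2.2 = (pvPass c t).2.2 := by
  refine ⟨?_, ?_, ?_⟩ <;> simp [pvPass, h]

theorem pass_map (c : Int) (st : List ((Int × Int) × Bool)) :
    (pvPass c st).2.1.map Prod.fst = st.map Prod.fst := by
  induction st generalizing c with
  | nil => simp [pvPass]
  | cons hd t ih =>
      by_cases h : (!hd.2 && decide (hd.1.1 ≤ c)) = true
      · rw [(pvPass_cons_true c hd t h).2.1]; simp [ih]
      · rw [(pvPass_cons_false c hd t (by simpa using h)).2.1]; simp [ih]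

theorem pass_pos (c : Int) (st : List ((Int × Int) × Bool)) (hp : ∀ q ∈ st, 0 ≤ q.1.2) :
    ∀ q ∈ (pvPass c st).2.1, 0 ≤ q.1.2 := by
  intro q hq
  have hm : q.1 ∈ (pvPass c st).2.1.map Prod.fst := List.mem_map_of_mem hq
  rw [pass_map] at hm
  obtain ⟨r, hr, hre⟩ := List.mem_map.mp hm
  have := hp r hr
  rw [hre] at this
  exact this

theorem pass_sum (c : Int) (st : List ((Int × Int) × Bool)) :
    (pvPass c st).1 + sumB st = c + sumB (pvPass c st).2.1 := by
  induction st generalizing c with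
  | nil => simp [pvPass]
  | cons hd t ih =>
      by_cases h : (!hd.2 && decide (hd.1.1 ≤ c)) = true
      · obtain ⟨hq2, -⟩ : hd.2 = false ∧ hd.1.1 ≤ c := by simpa using h
        obtain ⟨e1, e2, -⟩ := pvPass_cons_true c hd t h
        rw [e1, e2, sumB_cons, sumB_cons]
        have := ih (c + hd.1.2)
        simp [hq2]
        omega
      · obtain ⟨e1, e2, -⟩ := pvPass_cons_false c hd t (by simpa using h)
        rw [e1, e2, sumB_cons, sumB_cons]
        have := ih c
        omega

theorem pass_mono (c : Int) (st : List ((Int × Int) × Bool)) (hp : ∀ q ∈ st, 0 ≤ q.1.2) :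
    c ≤ (pvPass c st).1 := by
  induction st generalizing c with
  | nil => simp [pvPass]
  | cons hd t ih =>
      have hb := hp hd (by simp)
      have hpt : ∀ r ∈ t, 0 ≤ r.1.2 := fun r hr => hp r (by simp [hr])
      by_cases h : (!hd.2 && decide (hd.1.1 ≤ c)) = true
      · rw [(pvPass_cons_true c hd t h).1]
        have := ih (c + hd.1.2) hpt
        omega
      · rw [(pvPass_cons_false c hd t (by simpa using h)).1]
        exact ih c hpt

theorem pass_beaten (c : Int) (st : List ((Int × Int) × Bool)) (hp : ∀ q ∈ st, 0 ≤ q.1.2)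
    (hinv : ∀ q ∈ st, q.2 = true → q.1.1 ≤ c) :
    ∀ q ∈ (pvPass c st).2.1, q.2 = true → q.1.1 ≤ (pvPass c st).1 := by
  induction st generalizing c with
  | nil => simp [pvPass]
  | cons hd t ih =>
      have hpt : ∀ r ∈ t, 0 ≤ r.1.2 := fun r hr => hp r (by simp [hr])
      have hb := hp hd (by simp)
      by_cases h : (!hd.2 && decide (hd.1.1 ≤ c)) = true
      · obtain ⟨-, hqc⟩ : hd.2 = false ∧ hd.1.1 ≤ c := by simpa using h
        obtain ⟨e1, e2, -⟩ := pvPass_cons_true c hd t h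
        rw [e1, e2]
        intro r hr hrb
        rcases List.mem_cons.mp hr with he | hm
        · subst he
          have := pass_mono (c + hd.1.2) t hpt
          simpa using by omega
        · exact ih (c + hd.1.2) hpt
            (fun s hs hsb => by have := hinv s (by simp [hs]) hsb; omega) r hm hrb
      · obtain ⟨e1, e2, -⟩ := pvPass_cons_false c hd t (by simpa using h)
        rw [e1, e2]
        intro r hr hrb
        rcases List.mem_cons.mp hr with he | hm
        · have h1 := hinv hd (by simp) (he ▸ hrb)
          have h2 := pass_mono c t hpt
          have h3 : r.1.1 = hd.1.1 := by rw [he]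
          omega
        · exact ih c hpt (fun s hs hsb => hinv s (by simp [hs]) hsb) r hm hrb

theorem pass_stable (c : Int) (st : List ((Int × Int) × Bool)) (h : (pvPass c st).2.2 = false) :
    (pvPass c st).2.1 = st ∧ (pvPass c st).1 = c ∧ ∀ q ∈ st, q.2 = false → ¬ q.1.1 ≤ c := by
  induction st generalizing c with
  | nil => simp [pvPass]
  | cons hd t ih =>
      by_cases hc : (!hd.2 && decide (hd.1.1 ≤ c)) = true
      · rw [(pvPass_cons_true c hd t hc).2.2] at h
        simp at h
      · obtain ⟨e1, e2, e3⟩ := pvPass_cons_false c hd t (by simpa using hc)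
        rw [e3] at h
        obtain ⟨h1, h2, h3⟩ := ih c h
        refine ⟨by rw [e2, h1], by rw [e1, h2], ?_⟩
        intro r hr hrb
        rcases List.mem_cons.mp hr with he | hm
        · subst he
          intro hle
          apply hc
          simp [hrb, hle]
        · exact h3 r hm hrb

theorem pass_unbeat_le (c : Int) (st : List ((Int × Int) × Bool)) :
    unbeat (pvPass c st).2.1 ≤ unbeat st := by
  induction st generalizing c with
  | nil => simp [pvPass]
  | cons hd t ih =>
      by_cases h : (!hd.2 && decide (hd.1.1 ≤ c)) = true
      · obtain ⟨hq2, -⟩ : hd.2 = false ∧ hd.1.1 ≤ c := by simpa using h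
        rw [(pvPass_cons_true c hd t h).2.1, unbeat_cons, unbeat_cons]
        have := ih (c + hd.1.2)
        simp [hq2]
        omega
      · rw [(pvPass_cons_false c hd t (by simpa using h)).2.1, unbeat_cons, unbeat_cons]
        have := ih c
        omega

theorem pass_progress (c : Int) (st : List ((Int × Int) × Bool))
    (h : (pvPass c st).2.2 = true) : unbeat (pvPass c st).2.1 < unbeat st := by
  induction st generalizing c with
  | nil => simp [pvPass] at h
  | cons hd t ih =>
      by_cases hc : (!hd.2 && decide (hd.1.1 ≤ c)) = true
      · obtain ⟨hq2, -⟩ : hd.2 = false ∧ hd.1.1 ≤ c := by simpa using hc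
        rw [(pvPass_cons_true c hd t hc).2.1, unbeat_cons, unbeat_cons]
        have := pass_unbeat_le (c + hd.1.2) t
        simp [hq2]
        omega
      · obtain ⟨e1, e2, e3⟩ := pvPass_cons_false c hd t (by simpa using hc)
        rw [e3] at h
        rw [e2, unbeat_cons, unbeat_cons]
        have := ih c h
        omega

-- one pass keeps 'current + (slack + unbeaten-and-beatable-under-w increments) ≤ w'
theorem pass_le (w : Int) (st : List ((Int × Int) × Bool)) (hp : ∀ q ∈ st, 0 ≤ q.1.2) :
    ∀ c k, 0 ≤ k → c + (k + sumLeU w st) ≤ w →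
      (pvPass c st).1 + (k + sumLeU w (pvPass c st).2.1) ≤ w := by
  induction st with
  | nil => intro c k hk h; simpa [pvPass, sumLeU] using h
  | cons hd t ih =>
      intro c k hk h
      have hb := hp hd (by simp)
      have hpt : ∀ r ∈ t, 0 ≤ r.1.2 := fun r hr => hp r (by simp [hr])
      have hnn := sumLeU_nonneg w t hpt
      have hnn2 := sumLeU_nonneg w (hd :: t) hp
      have hcw : c ≤ w := by omega
      by_cases hc : (!hd.2 && decide (hd.1.1 ≤ c)) = true
      · obtain ⟨hq2, hqc⟩ : hd.2 = false ∧ hd.1.1 ≤ c := by simpa using hc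
        have hqw : (!hd.2 && decide (hd.1.1 ≤ w)) = true := by
          simp [hq2]; omega
        have hs : sumLeU w (hd :: t) = hd.1.2 + sumLeU w t := by
          rw [sumLeU_cons, if_pos hqw]
        obtain ⟨e1, e2, -⟩ := pvPass_cons_true c hd t hc
        rw [e1, e2]
        have hs2 : sumLeU w ((hd.1, true) :: (pvPass (c + hd.1.2) t).2.1)
            = sumLeU w (pvPass (c + hd.1.2) t).2.1 := by
          rw [sumLeU_cons]; simp
        rw [hs2]
        exact ih hpt (c + hd.1.2) k hk (by omega)
      · obtain ⟨e1, e2, -⟩ := pvPass_cons_false c hd t (by simpa using hc)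
        rw [e1, e2]
        set ht := if !hd.2 && decide (hd.1.1 ≤ w) then hd.1.2 else 0 with hdef
        have hs : sumLeU w (hd :: t) = ht + sumLeU w t := sumLeU_cons w hd t
        have htnn : 0 ≤ ht := by rw [hdef]; split_ifs <;> omega
        have hrec := ih hpt c (k + ht) (by omega) (by omega)
        have hs3 : sumLeU w (hd :: (pvPass c t).2.1) = ht + sumLeU w (pvPass c t).2.1 :=
          sumLeU_cons w hd (pvPass c t).2.1
        rw [hs3]
        omega

theorem pvLoop_succ (n : Nat) (c : Int) (st : List ((Int × Int) × Bool)) :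
    pvLoop (n + 1) c st =
      if (pvPass c st).2.2 = true then pvLoop n (pvPass c st).1 (pvPass c st).2.1
      else (pvPass c st).1 := by
  simp [pvLoop]

-- the whole while-loop keeps the same bound: B's result never exceeds such a w
theorem loop_le (w : Int) : ∀ (fuel : Nat) (c : Int) (st : List ((Int × Int) × Bool)),
    (∀ q ∈ st, 0 ≤ q.1.2) → c + sumLeU w st ≤ w → pvLoop fuel c st ≤ w := by
  intro fuel
  induction fuel with
  | zero =>
      intro c st hp h
      have := sumLeU_nonneg w st hp
      simp [pvLoop]; omega
  | succ n ih =>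
      intro c st hp h
      have hple := pass_le w st hp c 0 le_rfl (by omega)
      rw [pvLoop_succ]
      by_cases hch : (pvPass c st).2.2 = true
      · rw [if_pos hch]
        exact ih (pvPass c st).1 (pvPass c st).2.1 (pass_pos c st hp) (by omega)
      · rw [if_neg hch]
        have := sumLeU_nonneg w (pvPass c st).2.1 (pass_pos c st hp)
        omega

-- with enough fuel the loop reaches the Source B fixpoint: beaten = {skill ≤ result} exactly
theorem loop_spec : ∀ (fuel : Nat) (c : Int) (st : List ((Int × Int) × Bool)),
    unbeat st < fuel → (∀ q ∈ st, 0 ≤ q.1.2) → (∀ q ∈ st, q.2 = true → q.1.1 ≤ c) →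
    ∃ st', st'.map Prod.fst = st.map Prod.fst ∧
      pvLoop fuel c st + sumB st = c + sumB st' ∧
      (∀ q ∈ st', q.2 = true ↔ q.1.1 ≤ pvLoop fuel c st) := by
  intro fuel
  induction fuel with
  | zero => intro c st h; omega
  | succ n ih =>
      intro c st hfu hp hinv
      rw [pvLoop_succ]
      by_cases hch : (pvPass c st).2.2 = true
      · rw [if_pos hch]
        have hprog := pass_progress c st hch
        obtain ⟨st', h1, h2, h3⟩ := ih (pvPass c st).1 (pvPass c st).2.1
          (by omega) (pass_pos c st hp) (pass_beaten c st hp hinv)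
        refine ⟨st', by rw [h1, pass_map], ?_, h3⟩
        have := pass_sum c st
        omega
      · rw [if_neg hch]
        have hch' : (pvPass c st).2.2 = false := by simpa using hch
        obtain ⟨h1, h2, h3⟩ := pass_stable c st hch'
        refine ⟨st, rfl, by omega, ?_⟩
        intro q hq
        constructor
        · intro hb; rw [h2]; exact hinv q hq hb
        · intro hle
          by_contra hnb
          exact h3 q hq (by simpa using hnb) (by omega)

-- on a fixpoint state, the beaten total is the skill ≤ w total
theorem sumB_eq_sumLe (w : Int) (st : List ((Int × Int) × Bool))
    (h : ∀ q ∈ st, q.2 = true ↔ q.1.1 ≤ w) : sumB st = sumLe w (st.map Prod.fst) := by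
  induction st with
  | nil => simp [sumB, sumLe]
  | cons q t ih =>
      rw [sumB_cons, List.map_cons, sumLe_cons, ih (fun r hr => h r (by simp [hr]))]
      have hq := h q (by simp)
      by_cases hle : q.1.1 ≤ w
      · simp [hq.mpr hle, hle]
      · have : q.2 = false := by
          cases hb : q.2
          · rfl
          · exact absurd (hq.mp hb) hle
        simp [this, hle]

-- the unbeaten-and-≤w total of the all-unbeaten start state is sumLe
theorem sumLeU_start (w : Int) (l : List (Int × Int)) :
    sumLeU w (l.map (fun p => (p, false))) = sumLe w l := by
  induction l with
  | nil => simp [sumLeU, sumLe]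
  | cons p t ih =>
      rw [List.map_cons, sumLeU_cons, sumLe_cons, ih]
      by_cases h : p.1 ≤ w <;> simp [h]

-- sorted2 with keys (fst, snd) is the insertion-sort foldl
theorem sorted2_eq_foldl (xs : List (Int × Int)) :
    PySem.List.sorted2 xs Prod.fst Prod.snd =
      xs.foldl (fun acc x => PySem.List.insertBy
        (fun a b => decide (a.1 < b.1) || (!decide (b.1 < a.1) && decide (a.2 < b.2))) x acc) [] := rfl

theorem insertBy_pairwise_fst (x : Int × Int) (ys : List (Int × Int))
    (h : ys.Pairwise (fun a b => a.1 ≤ b.1)) :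
    (PySem.List.insertBy
      (fun a b => decide (a.1 < b.1) || (!decide (b.1 < a.1) && decide (a.2 < b.2))) x ys).Pairwise
      (fun a b => a.1 ≤ b.1) := by
  induction ys with
  | nil => simp [PySem.List.insertBy]
  | cons y t ih =>
      rw [List.pairwise_cons] at h
      by_cases hb : (decide (x.1 < y.1) || (!decide (y.1 < x.1) && decide (x.2 < y.2))) = true
      · have hxy : x.1 ≤ y.1 := by
          rcases (by simpa using hb : x.1 < y.1 ∨ (¬ y.1 < x.1 ∧ x.2 < y.2)) with h1 | ⟨h2, -⟩
          · omega
          · omega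
        simp only [PySem.List.insertBy, hb, if_true]
        refine List.pairwise_cons.mpr ⟨?_, List.pairwise_cons.mpr h⟩
        intro z hz
        rcases List.mem_cons.mp hz with he | hm
        · subst he; exact hxy
        · exact le_trans hxy (h.1 z hm)
      · have hyx : y.1 ≤ x.1 := by
          have h1 : ¬ x.1 < y.1 := by
            intro hlt
            exact hb (by simp [hlt])
          omega
        simp only [PySem.List.insertBy, hb]
        refine List.pairwise_cons.mpr ⟨?_, ih h.2⟩
        intro z hz
        rcases (PySem.List.insertBy_mem_iff _ _ _ _).mp hz with he | hm
        · subst he; exact hyx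
        · exact h.1 z hm

theorem sorted2_pairwise_fst (xs : List (Int × Int)) :
    (PySem.List.sorted2 xs Prod.fst Prod.snd).Pairwise (fun a b => a.1 ≤ b.1) := by
  rw [sorted2_eq_foldl]
  have : ∀ (l : List (Int × Int)) (acc : List (Int × Int)),
      acc.Pairwise (fun a b => a.1 ≤ b.1) →
      (l.foldl (fun acc x => PySem.List.insertBy
        (fun a b => decide (a.1 < b.1) || (!decide (b.1 < a.1) && decide (a.2 < b.2))) x acc) acc).Pairwise
        (fun a b => a.1 ≤ b.1) := by
    intro l
    induction l with
    | nil => intro acc h; simpa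
    | cons x t ih =>
        intro acc h
        exact ih _ (insertBy_pairwise_fst x acc h)
  exact this xs [] (by simp)

-- ===== VERDICT (by name: the statement is the Claim_ definition above) =====
theorem max_skill_level_spec : Claim_equal_max_skill_level := by
  intro N M A B hdom hpre
  unfold Spec_max_skill_level
  obtain ⟨-, -, -, hB⟩ := hpre
  set P := A.zip B with hP
  have hpos : ∀ p ∈ P, 0 ≤ p.2 := by
    intro p hp
    have := (List.of_mem_zip hp).2
    have := (hB p.2 this).1
    omega
  -- B's result is a fixpoint value
  set st0 := P.map (fun p => (p, false)) with hst0
  have hst0map : st0.map Prod.fst = P := by simp [hst0, Function.comp_def]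
  have hst0pos : ∀ q ∈ st0, 0 ≤ q.1.2 := by
    intro q hq
    rw [hst0] at hq
    obtain ⟨p, hp, he⟩ := List.mem_map.mp hq
    subst he
    exact hpos p hp
  have hst0sumB : sumB st0 = 0 := by
    rw [hst0]
    induction P with
    | nil => simp [sumB]
    | cons p t ih => rw [List.map_cons, sumB_cons]; simpa using ih
  have hst0inv : ∀ q ∈ st0, q.2 = true → q.1.1 ≤ M := by
    intro q hq hb
    rw [hst0] at hq
    obtain ⟨p, hp, he⟩ := List.mem_map.mp hq
    rw [← he] at hb; simp at hb
  have hunbeat : unbeat st0 < P.length + 1 := by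
    have h1 : unbeat st0 ≤ st0.length := List.length_filter_le _ _
    have h2 : st0.length = P.length := by simp [hst0]
    omega
  set vB := max_skill_level_alt N M A B with hvB
  have hvB' : vB = pvLoop (P.length + 1) M st0 := rfl
  obtain ⟨stB, hmap, hsum, hiff⟩ := loop_spec (P.length + 1) M st0 hunbeat hst0pos hst0inv
  have hfixB : vB = M + sumLe vB P := by
    rw [hvB']
    have := sumB_eq_sumLe (pvLoop (P.length + 1) M st0) stB hiff
    rw [hmap, hst0map] at this
    omega
  -- A's result is a fixpoint value
  set S := PySem.List.sorted2 P Prod.fst Prod.snd with hS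
  have hperm : S.Perm P := PySem.List.sorted2_perm P Prod.fst Prod.snd false
  have hposS : ∀ p ∈ S, 0 ≤ p.2 := fun p hp => hpos p (hperm.mem_iff.mp hp)
  set vA := max_skill_level N M A B with hvA
  have hvA' : vA = gr S M := rfl
  have hfixA : vA = M + sumLe vA S := by
    rw [hvA']
    exact gr_char S (sorted2_pairwise_fst P) hposS M
  have hfixA' : vA = M + sumLe vA P :=
    hfixA.trans (by rw [sumLe_perm vA hperm])
  -- vA ≤ vB by gr_le with w = vB
  have h1 : vA ≤ vB := by
    rw [hvA']
    apply gr_le vB S hposS M 0 le_rfl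
    rw [sumLe_perm vB hperm]
    omega
  -- vB ≤ vA by loop_le with w = vA
  have h2 : vB ≤ vA := by
    rw [hvB']
    apply loop_le vA (P.length + 1) M st0 hst0pos
    rw [hst0, sumLeU_start vA P]
    omega
  omega
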